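-- pv_equiv track=rewrite | github.com/Sai-Sindhu-Chunduri/Python-programs | canada_number.py | non_trivial_divisors
-- ===== SOURCE A (Python) =====
-- from math import sqrt
--
-- def non_trivial_divisors(n):
--     result=0
--
--     for i in range(1,int(sqrt(n))+1):#25
--         if n%i==0:#25%5==0:T
--             if i==n//i:#5==25//5
--                 result+=i#
--             else:
--                 result+=i+n//i#26
--     return result-1-n
-- ===== SOURCE B (Python) =====
-- def non_trivial_divisors(n):
--     if n < 0:
--         raise ValueError("math domain error")
--     sigma = 1
--     m = n
--     d = 2
--     while d * d <= m:
--         if m % d == 0: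
--             pk = 1
--             while m % d == 0:
--                 pk *= d
--                 m //= d
--             sigma *= (pk * d - 1) // (d - 1)
--         d += 1
--     if m > 1:
--         sigma *= m + 1
--     return sigma - 1 - n
-- ===== Notes on version B (the rewrite author's own statement) =====
-- stated objective: alternative
-- what changed: A sums divisors directly by pairing each i <= sqrt(n) with its cofactor n//i; B instead factorizes n by trial division and computes the divisor sum with the multiplicative formula sigma(n) = prod (p^(e+1)-1)/(p-1) over the prime factorization, then returns sigma - 1 - n.
-- outside the precondition, e.g. on non_trivial_divisors(0): A returns -1, B returns 0
import Mathlib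
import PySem

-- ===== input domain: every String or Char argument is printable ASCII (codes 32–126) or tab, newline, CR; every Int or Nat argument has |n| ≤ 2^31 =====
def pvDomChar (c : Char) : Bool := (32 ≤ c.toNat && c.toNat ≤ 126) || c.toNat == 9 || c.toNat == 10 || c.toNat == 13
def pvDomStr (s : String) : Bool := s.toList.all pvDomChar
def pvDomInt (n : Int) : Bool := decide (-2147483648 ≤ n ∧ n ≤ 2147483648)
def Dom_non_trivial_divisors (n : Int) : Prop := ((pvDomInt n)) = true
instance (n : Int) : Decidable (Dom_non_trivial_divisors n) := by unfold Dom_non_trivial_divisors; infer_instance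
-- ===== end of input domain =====

-- B replaces A's sqrt(n)-bounded divisor pairing by a different algorithm: trial-division prime
-- factorization with the multiplicative divisor-sum formula sigma(n) = prod (p^(e+1)-1)/(p-1).
-- Both raise ValueError on negative n.

-- ===== PORT A =====
-- int(sqrt(n)) is ported as Nat.sqrt n.toNat: for 0 ≤ n ≤ 2^31 Python's float sqrt
-- truncation equals the integer square root.
def non_trivial_divisors (n : Int) : Int :=
  let result : Int :=
    (PySem.List.pyRange 1 ((Nat.sqrt n.toNat : Int) + 1) 1).foldl
      (fun result i =>
        if PySem.Int.mod n i = 0 then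
          if i = PySem.Int.floordiv n i then result + i
          else result + (i + PySem.Int.floordiv n i)
        else result) 0
  result - 1 - n

-- ===== PORT B =====
-- Source B's inner loop 'while m % d == 0: pk *= d; m //= d'. The fuel argument is only a
-- totality device: each iteration at least halves m, and every call supplies fuel ≥ m.
def bInner : Nat → Int → Int → Int → Int × Int
  | 0, _, pk, m => (pk, m)
  | fuel + 1, d, pk, m =>
    if PySem.Int.mod m d = 0 then bInner fuel d (pk * d) (PySem.Int.floordiv m d)
    else (pk, m)

-- Source B's outer loop 'while d * d <= m: …; d += 1'; fuel ≥ m + 2 - d bounds its iterations.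
def bOuter : Nat → Int → Int → Int → Int × Int
  | 0, _, m, sigma => (sigma, m)
  | fuel + 1, d, m, sigma =>
    if d * d ≤ m then
      if PySem.Int.mod m d = 0 then
        let r := bInner m.toNat d 1 m
        bOuter fuel (d + 1) r.2 (sigma * PySem.Int.floordiv (r.1 * d - 1) (d - 1))
      else bOuter fuel (d + 1) m sigma
    else (sigma, m)

def non_trivial_divisors_alt (n : Int) : Int :=
  let r := bOuter (n.toNat + 2) 2 n 1
  (if 1 < r.2 then r.1 * (r.2 + 1) else r.1) - 1 - n

-- ===== PRECONDITION & SPEC =====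
-- Pre_ excludes the negative inputs, on which both A (math.sqrt) and B raise ValueError, and the
-- degenerate input 0, where 'sum of non-trivial divisors of 0' is undefined and A's -1 (empty
-- range) and B's 0 (empty product of prime powers) are equally accidental values.
def Pre_non_trivial_divisors (n : Int) : Prop := 0 < n
instance (n : Int) : Decidable (Pre_non_trivial_divisors n) := by unfold Pre_non_trivial_divisors; infer_instance
def pvWitness_non_trivial_divisors : Int := 36

def Spec_non_trivial_divisors (n : Int) (out : Int) : Prop := out = non_trivial_divisors_alt n
instance (n : Int) (out : Int) : Decidable (Spec_non_trivial_divisors n out) := by unfold Spec_non_trivial_divisors; infer_instance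

-- ===== CLAIM (what is proved, stated in full; the proofs are below) =====
def Claim_equal_non_trivial_divisors : Prop := ∀ (n : Int), Dom_non_trivial_divisors n → Pre_non_trivial_divisors n → Spec_non_trivial_divisors n (non_trivial_divisors n)

-- ===== LEMMAS AND PROOFS =====

-- ℕ-level mirrors of B's two loops
def nInner (d pk m : ℕ) : ℕ × ℕ :=
  if h : 2 ≤ d ∧ 0 < m ∧ m % d = 0 then nInner d (pk * d) (m / d) else (pk, m)
termination_by m
decreasing_by exact Nat.div_lt_self h.2.1 (by omega)

theorem nInner_snd_le (d pk m : ℕ) : (nInner d pk m).2 ≤ m := by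
  fun_induction nInner d pk m with
  | case1 pk m h ih => exact le_trans ih (Nat.div_le_self m d)
  | case2 pk m h => exact le_refl m

def nOuter (d m sigma : ℕ) : ℕ × ℕ :=
  if hg : d * d ≤ m then
    if m % d = 0 then
      let r := nInner d 1 m
      nOuter (d + 1) r.2 (sigma * ((r.1 * d - 1) / (d - 1)))
    else nOuter (d + 1) m sigma
  else (sigma, m)
termination_by m + 2 - d
decreasing_by
  · have hdm : d ≤ m := by
      rcases Nat.eq_zero_or_pos d with h | h
      · omega
      · exact le_trans (Nat.le_mul_of_pos_left d h) hg
    have := nInner_snd_le d 1 m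
    omega
  · have hdm : d ≤ m := by
      rcases Nat.eq_zero_or_pos d with h | h
      · omega
      · exact le_trans (Nat.le_mul_of_pos_left d h) hg
    omega

-- first component of nInner stays positive
theorem nInner_fst_pos (d pk m : ℕ) : 1 ≤ d → 1 ≤ pk → 1 ≤ (nInner d pk m).1 := by
  fun_induction nInner d pk m with
  | case1 pk m h ih =>
    intro hd hpk
    exact ih hd (le_trans hpk (Nat.le_mul_of_pos_right pk (by omega)))
  | case2 pk m h => exact fun _ hpk => hpk

-- with enough fuel, the Int loops are the casts of the ℕ loops
theorem bInner_cast (f : ℕ) : ∀ d pk m : ℕ, 2 ≤ d → 1 ≤ m → m ≤ f →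
    bInner f (d : ℤ) (pk : ℤ) (m : ℤ) = (((nInner d pk m).1 : ℤ), ((nInner d pk m).2 : ℤ)) := by
  induction f with
  | zero => intro d pk m hd hm hf; omega
  | succ f ih =>
    intro d pk m hd hm hf
    rw [bInner]
    by_cases hmod : m % d = 0
    · rw [if_pos (by rw [PySem.Int.mod_natCast]; exact_mod_cast hmod)]
      have hdvd : d ∣ m := Nat.dvd_of_mod_eq_zero hmod
      have hq1 : 1 ≤ m / d := Nat.div_pos (Nat.le_of_dvd hm hdvd) (by omega)
      have hqlt : m / d < m := Nat.div_lt_self hm (by omega)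
      rw [nInner, dif_pos ⟨hd, hm, hmod⟩]
      rw [show ((pk : ℤ) * d = ((pk * d : ℕ) : ℤ)) by push_cast; ring, PySem.Int.floordiv_natCast,
          ih d (pk * d) (m / d) hd hq1 (by omega)]
    · rw [if_neg (by rw [PySem.Int.mod_natCast]; exact_mod_cast hmod)]
      rw [nInner, dif_neg (fun h => hmod h.2.2)]

theorem bOuter_cast (f : ℕ) : ∀ d m sigma : ℕ, 2 ≤ d → m + 2 - d ≤ f →
    bOuter f (d : ℤ) (m : ℤ) (sigma : ℤ)
      = (((nOuter d m sigma).1 : ℤ), ((nOuter d m sigma).2 : ℤ)) := by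
  induction f with
  | zero =>
    intro d m sigma hd hf
    have hg : ¬ d * d ≤ m := fun hc =>
      absurd (le_trans (Nat.le_mul_of_pos_left d (by omega)) hc) (by omega)
    rw [bOuter, nOuter, dif_neg hg]
  | succ f ih =>
    intro d m sigma hd hf
    rw [bOuter, nOuter]
    by_cases hg : d * d ≤ m
    · have hdm : d ≤ m := le_trans (Nat.le_mul_of_pos_left d (by omega)) hg
      have hm4 : 1 ≤ m := by omega
      rw [dif_pos hg, if_pos (by exact_mod_cast hg)]
      by_cases hmod : m % d = 0
      · rw [if_pos (by rw [PySem.Int.mod_natCast]; exact_mod_cast hmod), if_pos hmod]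
        have hbi := bInner_cast ((m : ℤ)).toNat d 1 m hd hm4 (by simp)
        rw [Nat.cast_one] at hbi
        show bOuter f ((d : ℤ) + 1) ((bInner ((m:ℤ)).toNat (d:ℤ) 1 (m:ℤ)).2)
            ((sigma : ℤ) * PySem.Int.floordiv ((bInner ((m:ℤ)).toNat (d:ℤ) 1 (m:ℤ)).1 * (d:ℤ) - 1) ((d:ℤ) - 1)) = _
        rw [hbi]
        have hpk : 1 ≤ (nInner d 1 m).1 := nInner_fst_pos d 1 m (by omega) (le_refl 1)
        have hpkd : 1 ≤ (nInner d 1 m).1 * d := le_trans hpk (Nat.le_mul_of_pos_right _ (by omega))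
        have hcast1 : ((nInner d 1 m).1 : ℤ) * (d : ℤ) - 1 = (((nInner d 1 m).1 * d - 1 : ℕ) : ℤ) := by
          push_cast [hpkd]; ring
        have hcast2 : (d : ℤ) - 1 = ((d - 1 : ℕ) : ℤ) := by push_cast [show 1 ≤ d by omega]; ring
        rw [hcast1, hcast2, PySem.Int.floordiv_natCast,
            show ((sigma : ℤ) * (((nInner d 1 m).1 * d - 1) / (d - 1) : ℕ)
              = ((sigma * (((nInner d 1 m).1 * d - 1) / (d - 1)) : ℕ) : ℤ)) by push_cast; ring,
            show ((d : ℤ) + 1 = ((d + 1 : ℕ) : ℤ)) by push_cast; ring]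
        have hle := nInner_snd_le d 1 m
        exact ih (d + 1) (nInner d 1 m).2 _ (by omega) (by omega)
      · rw [if_neg (by rw [PySem.Int.mod_natCast]; exact_mod_cast hmod), if_neg hmod,
            show ((d : ℤ) + 1 = ((d + 1 : ℕ) : ℤ)) by push_cast; ring]
        exact ih (d + 1) m sigma (by omega) (by omega)
    · rw [dif_neg hg, if_neg (by exact_mod_cast hg)]

-- divisor sum
def sigma1 (m : ℕ) : ℕ := ∑ d ∈ m.divisors, d

-- inner loop extracts the full power of d
theorem nInner_spec (d pk m : ℕ) : 2 ≤ d → 1 ≤ m →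
    ∃ e : ℕ, (nInner d pk m).1 = pk * d ^ e ∧ m = d ^ e * (nInner d pk m).2
      ∧ ¬ d ∣ (nInner d pk m).2 ∧ 1 ≤ (nInner d pk m).2 := by
  fun_induction nInner d pk m with
  | case1 pk m h ih =>
    intro hd hm
    obtain ⟨e, h1, h2, h3, h4⟩ := ih hd
      (Nat.div_pos (Nat.le_of_dvd h.2.1 (Nat.dvd_of_mod_eq_zero h.2.2)) (by omega))
    refine ⟨e + 1, ?_, ?_, h3, h4⟩
    · rw [h1]; try ring
    · have hdvd : d ∣ m := Nat.dvd_of_mod_eq_zero h.2.2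
      calc m = d * (m / d) := (Nat.mul_div_cancel' hdvd).symm
        _ = d * (d ^ e * (nInner d (pk * d) (m / d)).2) := by rw [← h2]
        _ = d ^ (e + 1) * (nInner d (pk * d) (m / d)).2 := by ring
  | case2 pk m h =>
    intro hd hm
    exact ⟨0, by simp, by simp,
      fun hdvd => h ⟨hd, hm, (Nat.dvd_iff_mod_eq_zero).mp hdvd⟩, hm⟩

-- geometric sum: (d^e * d - 1) / (d - 1) = 1 + d + … + d^e
theorem geom_div (d e : ℕ) (hd : 2 ≤ d) :
    (d ^ e * d - 1) / (d - 1) = ∑ i ∈ Finset.range (e + 1), d ^ i := by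
  have key : (d - 1) * ∑ i ∈ Finset.range (e + 1), d ^ i = d ^ e * d - 1 := by
    induction e with
    | zero => simp
    | succ e ih =>
      rw [Finset.sum_range_succ, Nat.mul_add, ih]
      have hx : 1 ≤ d ^ e * d := Nat.one_le_iff_ne_zero.mpr (by positivity)
      have hsplit : (d - 1) * d ^ (e + 1) = d ^ (e + 1) * d - d ^ (e + 1) := by
        rw [Nat.sub_mul, one_mul, Nat.mul_comm d (d ^ (e + 1))]
      rw [hsplit, pow_succ]
      have hy : d ^ e * d ≤ d ^ e * d * d := Nat.le_mul_of_pos_right _ (by omega)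
      omega
  rw [← key, Nat.mul_div_cancel_left _ (by omega)]

theorem sigma1_prime_pow (p e : ℕ) (hp : p.Prime) :
    sigma1 (p ^ e) = ∑ i ∈ Finset.range (e + 1), p ^ i := by
  unfold sigma1
  rw [Nat.divisors_prime_pow hp, Finset.sum_map]
  rfl

theorem sigma1_mul (a b : ℕ) (h : a.Coprime b) : sigma1 (a * b) = sigma1 a * sigma1 b := by
  have := ArithmeticFunction.isMultiplicative_sigma (k := 1) |>.map_mul_of_coprime h
  simpa [ArithmeticFunction.sigma_one_apply, sigma1] using this

-- main invariant: the outer loop plus the final 'if m > 1' tail computes sigma * sigma1 m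
theorem nOuter_correct (d m sigma : ℕ) :
    2 ≤ d → 1 ≤ m → (∀ p : ℕ, p.Prime → p ∣ m → d ≤ p) →
    (if 1 < (nOuter d m sigma).2 then (nOuter d m sigma).1 * ((nOuter d m sigma).2 + 1)
     else (nOuter d m sigma).1) = sigma * sigma1 m := by
  fun_induction nOuter d m sigma with
  | case1 d m sigma hg hmod r ih =>
    intro hd hm hmin
    have hddvd : d ∣ m := Nat.dvd_of_mod_eq_zero hmod
    have hdprime : d.Prime := by
      have h1 : d.minFac.Prime := Nat.minFac_prime (by omega)
      have h2 : d ≤ d.minFac := hmin _ h1 (dvd_trans (Nat.minFac_dvd d) hddvd)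
      have h3 : d.minFac ≤ d := Nat.minFac_le (by omega)
      rwa [show d = d.minFac by omega]
    obtain ⟨e, he1, he2, he3, he4⟩ := nInner_spec d 1 m hd hm
    have hm'dvd : (nInner d 1 m).2 ∣ m := by
      have hmm := dvd_mul_left ((nInner d 1 m).2) (d ^ e)
      rwa [← he2] at hmm
    have hmin' : ∀ p : ℕ, p.Prime → p ∣ (nInner d 1 m).2 → d + 1 ≤ p := by
      intro p hp hpdvd
      have hple : d ≤ p := hmin p hp (dvd_trans hpdvd hm'dvd)
      have hne : p ≠ d := fun hpd => he3 (hpd ▸ hpdvd)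
      omega
    rw [ih (by omega) he4 hmin']
    have hco : (d ^ e).Coprime (nInner d 1 m).2 :=
      Nat.Coprime.pow_left e ((Nat.Prime.coprime_iff_not_dvd hdprime).mpr he3)
    rw [he1, one_mul, geom_div d e hd, ← sigma1_prime_pow d e hdprime]
    calc sigma * sigma1 (d ^ e) * sigma1 (nInner d 1 m).2
        = sigma * sigma1 (d ^ e * (nInner d 1 m).2) := by rw [sigma1_mul _ _ hco]; ring
      _ = sigma * sigma1 m := by rw [← he2]
  | case2 d m sigma hg hmod ih =>
    intro hd hm hmin
    refine ih (by omega) hm ?_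
    intro p hp hpdvd
    have h1 := hmin p hp hpdvd
    rcases Nat.lt_or_ge d p with h | h
    · omega
    · have hpd : p = d := by omega
      exact absurd ((Nat.dvd_iff_mod_eq_zero).mp (hpd ▸ hpdvd)) hmod
  | case3 d m sigma hg =>
    intro hd hm hmin
    rcases Nat.lt_or_ge 1 m with h1 | h1
    · have hmprime : m.Prime := by
        by_contra hnp
        have hp := Nat.minFac_prime (n := m) (by omega)
        have hsq := Nat.minFac_sq_le_self (n := m) (by omega) hnp
        have hdle : d ≤ m.minFac := hmin _ hp (Nat.minFac_dvd m)
        have hmul : d * d ≤ m.minFac * m.minFac := Nat.mul_le_mul hdle hdle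
        rw [pow_two] at hsq
        exact hg (le_trans hmul hsq)
      rw [if_pos h1]
      have hs : sigma1 m = 1 + m := by
        unfold sigma1
        rw [Nat.Prime.divisors hmprime,
            Finset.sum_insert (by simp [hmprime.one_lt.ne])]
        simp
      rw [hs]; ring
    · have hm1 : m = 1 := by omega
      subst hm1
      rw [if_neg (by omega)]
      simp [sigma1]

-- ===== A-side: the pair-sum over range(1, sqrt(m)+1) equals the divisor sum =====

def fA (m i : ℕ) : ℤ := if i ∣ m then (if i = m / i then (i : ℤ) else (i : ℤ) + ((m / i : ℕ) : ℤ)) else 0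

theorem sum_map_range (g : ℕ → ℤ) (n : ℕ) :
    ((List.range n).map g).sum = ∑ k ∈ Finset.range n, g k := by
  induction n with
  | zero => simp
  | succ n ih => simp [List.range_succ, Finset.sum_range_succ, ih]

theorem portA_sum (m : ℕ) :
    non_trivial_divisors (m : ℤ) = (∑ k ∈ Finset.range (Nat.sqrt m), fA m (k + 1)) - 1 - m := by
  unfold non_trivial_divisors
  have ht : ((Nat.sqrt ((m:ℤ).toNat) : ℤ) + 1 - 1).toNat = Nat.sqrt m := by simp
  rw [PySem.List.pyRange_one, ht, List.foldl_map,
      PySem.List.foldl_congr_mem _ _ (fun acc k => acc + fA m (k + 1)) _ ?_,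
      PySem.List.foldl_add, sum_map_range]
  · ring
  · intro acc k _
    have hcast : (1 : ℤ) + (k : ℤ) = ((k + 1 : ℕ) : ℤ) := by push_cast; ring
    rw [hcast, PySem.Int.mod_natCast, PySem.Int.floordiv_natCast]
    have hc1 : (((m % (k + 1) : ℕ) : ℤ) = 0) ↔ (k + 1) ∣ m := by
      rw [Int.natCast_eq_zero]; exact Nat.dvd_iff_mod_eq_zero.symm
    have hc2 : (((k + 1 : ℕ) : ℤ) = ((m / (k + 1) : ℕ) : ℤ)) ↔ (k + 1 = m / (k + 1)) :=
      Nat.cast_inj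
    unfold fA
    by_cases h : (k + 1) ∣ m
    · by_cases he : k + 1 = m / (k + 1)
      · simp only [if_pos (hc1.mpr h), if_pos (hc2.mpr he), if_pos h, if_pos he]
      · simp only [if_pos (hc1.mpr h), if_neg (fun c => he (hc2.mp c)), if_pos h, if_neg he]
    · simp only [if_neg (fun c => h (hc1.mp c)), if_neg h, add_zero]

theorem cofactor_large {m d : ℕ} (hm : m ≠ 0) (hd : d ∣ m)
    (hle : d ≤ Nat.sqrt m) (hne : d ≠ m / d) : ¬ m / d ≤ Nat.sqrt m := by
  intro hcon
  have hmpos : 0 < m := Nat.pos_of_ne_zero hm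
  have hdpos : 0 < d := Nat.pos_of_dvd_of_pos hd hmpos
  have hmul : d * (m / d) = m := Nat.mul_div_cancel' hd
  have hdd : d * d ≤ d * (m / d) := by rw [hmul]; exact Nat.le_sqrt.mp hle
  have hee : (m / d) * (m / d) ≤ d * (m / d) := by rw [hmul]; exact Nat.le_sqrt.mp hcon
  have hepos : 0 < m / d := Nat.div_pos (Nat.le_of_dvd hmpos hd) hdpos
  have h1 : d ≤ m / d := Nat.le_of_mul_le_mul_left hdd hdpos
  have h2 : m / d ≤ d := Nat.le_of_mul_le_mul_right hee hepos
  omega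

theorem cofactor_small {m d : ℕ} (hm : m ≠ 0) (hd : d ∣ m)
    (hgt : ¬ d ≤ Nat.sqrt m) : m / d ≤ Nat.sqrt m ∧ m / d < d := by
  have hmpos : 0 < m := Nat.pos_of_ne_zero hm
  have hdpos : 0 < d := Nat.pos_of_dvd_of_pos hd hmpos
  have hmul : d * (m / d) = m := Nat.mul_div_cancel' hd
  have hlt : d * (m / d) < d * d := by
    rw [hmul]; by_contra hc; exact hgt (Nat.le_sqrt.mpr (by omega))
  have hed : m / d < d := Nat.lt_of_mul_lt_mul_left hlt
  refine ⟨Nat.le_sqrt.mpr ?_, hed⟩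
  calc m / d * (m / d) ≤ m / d * d := Nat.mul_le_mul_left _ (Nat.le_of_lt hed)
    _ = m := Nat.div_mul_cancel hd

theorem shift_sum (f : ℕ → ℤ) (t : ℕ) :
    ∑ k ∈ Finset.range t, f (k + 1) = ∑ i ∈ Finset.Icc 1 t, f i := by
  induction t with
  | zero => simp
  | succ t ih => rw [Finset.sum_range_succ, ih, Finset.sum_Icc_succ_top (by omega)]

theorem filter_dvd_Icc (m t : ℕ) (hm : m ≠ 0) :
    (Finset.Icc 1 t).filter (· ∣ m) = m.divisors.filter (· ≤ t) := by
  ext d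
  simp only [Finset.mem_filter, Finset.mem_Icc, Nat.mem_divisors]
  constructor
  · rintro ⟨⟨h1, h2⟩, h3⟩; exact ⟨⟨h3, hm⟩, h2⟩
  · rintro ⟨⟨h1, _⟩, h2⟩
    exact ⟨⟨Nat.pos_of_dvd_of_pos h1 (Nat.pos_of_ne_zero hm), h2⟩, h1⟩

theorem sumA_eq_sigma (m : ℕ) (hm : m ≠ 0) :
    ∑ k ∈ Finset.range (Nat.sqrt m), fA m (k + 1) = ((sigma1 m : ℕ) : ℤ) := by
  have hmpos : 0 < m := Nat.pos_of_ne_zero hm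
  rw [shift_sum]
  have hA : ∑ i ∈ Finset.Icc 1 (Nat.sqrt m), fA m i
      = ∑ d ∈ m.divisors.filter (· ≤ Nat.sqrt m),
          (if d = m / d then (d : ℤ) else (d : ℤ) + ((m / d : ℕ) : ℤ)) := by
    unfold fA
    rw [← Finset.sum_filter, filter_dvd_Icc m (Nat.sqrt m) hm]
  rw [hA]
  have hsplit : ∑ d ∈ m.divisors.filter (· ≤ Nat.sqrt m),
        (if d = m / d then (d : ℤ) else (d : ℤ) + ((m / d : ℕ) : ℤ))
      = ∑ d ∈ m.divisors.filter (· ≤ Nat.sqrt m), (d : ℤ)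
        + ∑ d ∈ m.divisors.filter (· ≤ Nat.sqrt m),
            (if ¬ d = m / d then ((m / d : ℕ) : ℤ) else 0) := by
    rw [← Finset.sum_add_distrib]
    refine Finset.sum_congr rfl fun d _ => ?_
    split_ifs <;> ring
  rw [hsplit]
  have hbij : ∑ d ∈ m.divisors.filter (· ≤ Nat.sqrt m),
        (if ¬ d = m / d then ((m / d : ℕ) : ℤ) else 0)
      = ∑ d ∈ m.divisors.filter (fun d => ¬ d ≤ Nat.sqrt m), (d : ℤ) := by
    rw [← Finset.sum_filter, Finset.filter_filter]
    refine Finset.sum_nbij' (fun d => m / d) (fun d => m / d) ?_ ?_ ?_ ?_ ?_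
    · intro d hd
      simp only [Finset.mem_filter, Nat.mem_divisors] at hd ⊢
      obtain ⟨⟨hdvd, _⟩, hle, hne⟩ := hd
      exact ⟨⟨Nat.div_dvd_of_dvd hdvd, hm⟩, cofactor_large hm hdvd hle hne⟩
    · intro d hd
      simp only [Finset.mem_filter, Nat.mem_divisors] at hd ⊢
      obtain ⟨⟨hdvd, _⟩, hgt⟩ := hd
      obtain ⟨h1, h2⟩ := cofactor_small hm hdvd hgt
      refine ⟨⟨Nat.div_dvd_of_dvd hdvd, hm⟩, h1, ?_⟩
      rw [Nat.div_div_self hdvd hm]; omega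
    · intro d hd
      simp only [Finset.mem_filter, Nat.mem_divisors] at hd
      exact Nat.div_div_self hd.1.1 hm
    · intro d hd
      simp only [Finset.mem_filter, Nat.mem_divisors] at hd
      exact Nat.div_div_self hd.1.1 hm
    · intro d _; rfl
  rw [hbij, Finset.sum_filter_add_sum_filter_not]
  unfold sigma1
  push_cast
  rfl

-- B-side wrap-up: the alt port computes sigma1 m - 1 - m on positive input
theorem portB_sigma (m : ℕ) (hm : 1 ≤ m) :
    non_trivial_divisors_alt (m : ℤ) = ((sigma1 m : ℕ) : ℤ) - 1 - m := by
  unfold non_trivial_divisors_alt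
  have hbo := bOuter_cast (((m : ℤ)).toNat + 2) 2 m 1 (le_refl 2) (by simp)
  rw [Nat.cast_ofNat, Nat.cast_one] at hbo
  rw [hbo]
  have hcore := nOuter_correct 2 m 1 (le_refl 2) hm (fun p hp _ => hp.two_le)
  rw [one_mul] at hcore
  simp only
  rw [← hcore]
  split_ifs with h1 h2 h2
  · push_cast; ring
  · exact absurd (by exact_mod_cast h1) h2
  · exact absurd (by exact_mod_cast h2) h1
  · ring

-- ===== VERDICT (by name: the statement is the Claim_ definition above) =====
theorem non_trivial_divisors_spec : Claim_equal_non_trivial_divisors := by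
  intro n _ hpre
  unfold Spec_non_trivial_divisors
  obtain ⟨m, rfl⟩ : ∃ m : ℕ, n = (m : ℤ) := ⟨n.toNat, (Int.toNat_of_nonneg (le_of_lt hpre)).symm⟩
  have hm : m ≠ 0 := by
    unfold Pre_non_trivial_divisors at hpre; omega
  rw [portA_sum, portB_sigma m (Nat.one_le_iff_ne_zero.mpr hm), sumA_eq_sigma m hm]
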